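-- pv_equiv track=rewrite | github.com/posl/comment_recommendation | script/mod_gen/1_time/en/220_C/3.py | solve
-- ===== SOURCE A (Python) =====
-- def solve(N, A, X):
--     B = A * 100000
--     sum = 0
--     for i in range(1000000):
--         sum += B[i]
--         if sum > X:
--             return i + 1
--     return 0
-- ===== SOURCE B (Python) =====
-- def solve(N, A, X):
--     # Periodicity: prefix sums over one copy of A, then arithmetic on the cycle sum.
--     pref = []
--     s = 0
--     for a in A:
--         s += a
--         pref.append(s)
--     S = s
--     m = max(pref)
--     if m > X:
--         c = 0
--     elif S <= 0:
--         return 0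
--     else:
--         c = (X - m) // S + 1
--     i = c * len(A) + next(j for j, p in enumerate(pref) if p > X - c * S)
--     return i + 1 if i < 1000000 else 0
-- ===== Notes on version B (the rewrite author's own statement) =====
-- stated objective: faster
-- what changed: Instead of scanning up to 1000000 elements of A*100000 one by one, B computes the prefix sums of a single copy of A, uses the cycle sum to compute the number of full cycles needed by integer division, and locates the answer inside one cycle.
import Mathlib
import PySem

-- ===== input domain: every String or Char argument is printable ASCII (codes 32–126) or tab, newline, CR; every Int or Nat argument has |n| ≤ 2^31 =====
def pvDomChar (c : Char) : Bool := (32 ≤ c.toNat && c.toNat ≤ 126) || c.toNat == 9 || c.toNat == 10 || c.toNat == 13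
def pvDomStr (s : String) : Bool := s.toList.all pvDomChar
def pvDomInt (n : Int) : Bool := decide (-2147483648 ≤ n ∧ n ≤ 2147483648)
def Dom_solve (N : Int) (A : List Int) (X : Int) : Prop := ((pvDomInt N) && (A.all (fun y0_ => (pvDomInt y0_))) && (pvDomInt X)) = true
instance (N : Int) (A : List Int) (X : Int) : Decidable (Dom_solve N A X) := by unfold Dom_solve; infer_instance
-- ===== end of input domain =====

-- B replaces A's element-by-element scan of A*100000 by per-cycle arithmetic on the
-- prefix sums of a single copy of A (objective: faster).

-- ===== PORT A =====
-- the loop 'for i in range(1000000): sum += B[i]; if sum > X: return i+1' as structural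
-- recursion on the tail B[i:] (fuel = remaining range steps); when B[i] would raise
-- IndexError (tail empty before the fuel runs out) Python raises — outside Pre_solve.
def solveLoop (X : Int) : List Int → Nat → Nat → Int → Int
  | _, 0, _, _ => 0
  | [], _ + 1, _, _ => 0
  | b :: rest, fuel + 1, i, s =>
    if s + b > X then (i : Int) + 1 else solveLoop X rest fuel (i + 1) (s + b)

def solve (N : Int) (A : List Int) (X : Int) : Int :=
  solveLoop X ((List.replicate 100000 A).flatten) 1000000 0 0

-- ===== PORT B =====
-- the 'pref' list of Source B: running prefix sums with accumulator s
def prefList (s : Int) : List Int → List Int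
  | [] => []
  | a :: t => (s + a) :: prefList (s + a) t

-- tail of Source B once c is chosen: first j with pref[j] > X - c*S, then the 10^6 cap check
def solveAltFinish (L : Nat) (X S c : Int) (pref : List Int) : Int :=
  match pref.findIdx? (fun p => decide (p > X - c * S)) with
  | some j => if c * (L : Int) + j < 1000000 then c * (L : Int) + j + 1 else 0
  | none => 0   -- unreachable when called by solve_alt (Python's next() always finds j there)

def solve_alt (N : Int) (A : List Int) (X : Int) : Int :=
  let pref := prefList 0 A
  let S := A.sum   -- = the accumulator s after Source B's loop
  match PySem.List.max? pref (fun p => p) with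
  | none => 0      -- A = []: Python's max([]) raises ValueError (outside Pre_solve)
  | some m =>
    if m > X then solveAltFinish A.length X S 0 pref
    else if S ≤ 0 then 0
    else solveAltFinish A.length X S (PySem.Int.floordiv (X - m) S + 1) pref

-- ===== PRECONDITION & SPEC =====
-- Pre_solve is exactly where the Python A returns: A nonempty, and (when len(A) < 10, so
-- that A*100000 is shorter than the 10^6-step range) the running sum must exceed X within
-- the 100000 available cycles — on the excluded inputs A raises IndexError.
def Pre_solve (N : Int) (A : List Int) (X : Int) : Prop :=
  A ≠ [] ∧ (10 ≤ A.length ∨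
    ∃ j < A.length, (if 0 < A.sum then 99999 * A.sum else 0) + ((A.take (j + 1)).sum) > X)
instance (N : Int) (A : List Int) (X : Int) : Decidable (Pre_solve N A X) := by
  unfold Pre_solve; infer_instance
def pvWitness_solve : Int × List Int × Int := (0, ([1], 0))

def Spec_solve (N : Int) (A : List Int) (X : Int) (out : Int) : Prop := out = solve_alt N A X
instance (N : Int) (A : List Int) (X : Int) (out : Int) : Decidable (Spec_solve N A X out) := by
  unfold Spec_solve; infer_instance

-- ===== CLAIM (what is proved, stated in full; the proofs are below) =====
def Claim_equal_solve : Prop := ∀ (N : Int) (A : List Int) (X : Int),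
  Dom_solve N A X → Pre_solve N A X → Spec_solve N A X (solve N A X)

-- ===== LEMMAS AND PROOFS =====

-- prefix sum of the first k elements
def psum (l : List Int) (k : Nat) : Int := (l.take k).sum

lemma psum_zero (l : List Int) : psum l 0 = 0 := rfl
lemma psum_cons_succ (b : Int) (t : List Int) (k : Nat) :
    psum (b :: t) (k + 1) = b + psum t k := by simp [psum, List.take_succ_cons]

lemma prefList_length (s : Int) (l : List Int) : (prefList s l).length = l.length := by
  induction l generalizing s with
  | nil => rfl
  | cons a t ih => simp [prefList, ih]

lemma prefList_getElem (s : Int) (l : List Int) (j : Nat) (hj : j < l.length) :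
    (prefList s l)[j]'(by rw [prefList_length]; exact hj) = s + psum l (j + 1) := by
  induction l generalizing s j with
  | nil => simp at hj
  | cons a t ih =>
    cases j with
    | zero => simp [prefList, psum]
    | succ j' =>
      have := ih (s + a) j' (by simpa using hj)
      simp only [prefList, List.getElem_cons_succ, psum] at this ⊢
      simp [this, List.take_succ_cons]
      ring

-- characterization of A's scan loop: first index whose running sum exceeds X, within fuel
lemma solveLoop_eq (X : Int) (l : List Int) : ∀ (fuel i : Nat) (s : Int),
    solveLoop X l fuel i s =
      if h : ∃ k, k < min fuel l.length ∧ s + psum l (k + 1) > X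
      then ((i + Nat.find h : Nat) : Int) + 1 else 0 := by
  induction l with
  | nil =>
    intro fuel i s
    cases fuel <;> simp [solveLoop]
  | cons b t ih =>
    intro fuel i s
    cases fuel with
    | zero => simp [solveLoop]
    | succ f =>
      simp only [solveLoop]
      by_cases hb : s + b > X
      · have hP0 : 0 < min (f + 1) (b :: t).length ∧ s + psum (b :: t) (0 + 1) > X := by
          constructor
          · simp
          · simpa [psum_cons_succ, psum_zero]
        have hex : ∃ k, k < min (f + 1) (b :: t).length ∧ s + psum (b :: t) (k + 1) > X := ⟨0, hP0⟩
        rw [if_pos hb, dif_pos hex]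
        have h0 : Nat.find hex = 0 := by rw [Nat.find_eq_zero]; exact hP0
        rw [h0]
        simp
      · rw [if_neg hb, ih f (i + 1) (s + b)]
        by_cases hex' : ∃ k, k < min f t.length ∧ (s + b) + psum t (k + 1) > X
        · have hex : ∃ k, k < min (f + 1) (b :: t).length ∧ s + psum (b :: t) (k + 1) > X := by
            obtain ⟨k, hk1, hk2⟩ := hex'
            refine ⟨k + 1, by simp; omega, ?_⟩
            rw [psum_cons_succ]; linarith
          rw [dif_pos hex', dif_pos hex]
          have hfind : Nat.find hex = Nat.find hex' + 1 := by
            have hk1 := (Nat.find_spec hex').1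
            have hk2 := (Nat.find_spec hex').2
            rw [Nat.find_eq_iff]
            refine ⟨⟨?_, ?_⟩, ?_⟩
            · simp only [List.length_cons]; omega
            · rw [psum_cons_succ]; linarith
            · intro m hm
              cases m with
              | zero =>
                rintro ⟨-, h2⟩
                rw [psum_cons_succ, psum_zero] at h2
                omega
              | succ m' =>
                rintro ⟨h1, h2⟩
                have := Nat.find_min hex' (m := m') (by omega)
                rw [psum_cons_succ] at h2
                exact this ⟨by simp at h1; omega, by linarith⟩
          rw [hfind]
          push_cast
          ring
        · have hno : ¬ ∃ k, k < min (f + 1) (b :: t).length ∧ s + psum (b :: t) (k + 1) > X := by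
            rintro ⟨k, hk1, hk2⟩
            cases k with
            | zero => rw [psum_cons_succ, psum_zero] at hk2; omega
            | succ k' =>
              rw [psum_cons_succ] at hk2
              exact hex' ⟨k', by simp at hk1; omega, by linarith⟩
          rw [dif_neg hex', dif_neg hno]

-- periodicity of the prefix sums of A*100000
lemma psum_flatten_replicate (A : List Int) : ∀ (c n j : Nat), j ≤ A.length →
    (c < n ∨ j = 0) → c ≤ n →
    psum ((List.replicate n A).flatten) (c * A.length + j) = c * A.sum + psum A j := by
  intro c
  induction c with
  | zero =>
    intro n j hj hcj _
    cases n with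
    | zero =>
      have hj0 : j = 0 := by
        rcases hcj with h | h
        · omega
        · exact h
      simp [hj0, psum]
    | succ n' =>
      simp only [List.replicate_succ, List.flatten_cons, Nat.zero_mul, Nat.zero_add]
      rw [psum, psum, List.take_append]
      have hz : j - A.length = 0 := by omega
      simp [hz]
  | succ c' ih =>
    intro n j hj hcj hc
    cases n with
    | zero => omega
    | succ n' =>
      simp only [List.replicate_succ, List.flatten_cons]
      have harith : (c' + 1) * A.length + j = A.length + (c' * A.length + j) := by ring
      rw [psum, harith, List.take_append, List.take_of_length_le (by omega),
        Nat.add_sub_cancel_left, List.sum_append]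
      have := ih n' j hj (by omega) (by omega)
      rw [psum] at this
      rw [this]
      push_cast; ring

lemma length_flatten_replicate (A : List Int) (n : Nat) :
    ((List.replicate n A).flatten).length = n * A.length := by
  simp [List.length_flatten, List.map_replicate, List.sum_replicate, smul_eq_mul]

-- the central lemma: once Source B has picked the cycle count c (minimal with c*S + m > X),
-- its finish equals the first-exceed-index characterization of A's scan
lemma finish_eq (A : List Int) (X m : Int) (cN : Nat)
    (hL : 0 < A.length)
    (hmax : ∀ j, j < A.length → psum A (j + 1) ≤ m)
    (hmem : ∃ jm, jm < A.length ∧ psum A (jm + 1) = m)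
    (hcex : (cN : Int) * A.sum + m > X)
    (hcmin : ∀ c' : Nat, c' < cN → (c' : Int) * A.sum + m ≤ X)
    (hcap : cN ≤ 99999 ∨ 10 ≤ A.length) :
    solveAltFinish A.length X A.sum (cN : Int) (prefList 0 A) =
      (if h : ∃ k, k < min 1000000 (100000 * A.length) ∧
          psum ((List.replicate 100000 A).flatten) (k + 1) > X
       then ((Nat.find h : Nat) : Int) + 1 else 0) := by
  have hplen : (prefList 0 A).length = A.length := prefList_length 0 A
  have hpget : ∀ j (hj : j < A.length),
      (prefList 0 A)[j]'(by rw [hplen]; exact hj) = psum A (j + 1) := by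
    intro j hj
    rw [prefList_getElem 0 A j hj, zero_add]
  -- the generator finds some j0
  obtain ⟨j0, hfi⟩ : ∃ j0,
      (prefList 0 A).findIdx? (fun p => decide (p > X - (cN : Int) * A.sum)) = some j0 := by
    rcases hfi0 : (prefList 0 A).findIdx? (fun p => decide (p > X - (cN : Int) * A.sum)) with _ | j0
    · exfalso
      rw [List.findIdx?_eq_none_iff] at hfi0
      obtain ⟨jm, hjm, hjmv⟩ := hmem
      have hmmem : m ∈ prefList 0 A := by
        rw [List.mem_iff_getElem]
        exact ⟨jm, by rw [hplen]; exact hjm, by rw [hpget jm hjm]; exact hjmv⟩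
      have := hfi0 m hmmem
      simp only [decide_eq_false_iff_not, not_lt] at this
      linarith
    · exact ⟨j0, rfl⟩
  rw [List.findIdx?_eq_some_iff_getElem] at hfi
  obtain ⟨hj0len, hj0gt, hj0min⟩ := hfi
  rw [hplen] at hj0len
  rw [hpget j0 hj0len] at hj0gt
  simp only [decide_eq_true_eq] at hj0gt
  have hj0min' : ∀ j, j < j0 → psum A (j + 1) ≤ X - (cN : Int) * A.sum := by
    intro j hj
    have := hj0min j hj
    rw [hpget j (by omega)] at this
    simpa using this
  -- no index before cN*L + j0 exceeds
  have hnot : ∀ k : Nat, k < cN * A.length + j0 → k < 100000 * A.length →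
      ¬ psum ((List.replicate 100000 A).flatten) (k + 1) > X := by
    intro k hki hkM
    have hj' : k % A.length < A.length := Nat.mod_lt _ hL
    have hkeq : A.length * (k / A.length) + k % A.length = k := Nat.div_add_mod k A.length
    have hc' : k / A.length < 100000 := by
      rw [Nat.div_lt_iff_lt_mul hL]
      omega
    have hsum : psum ((List.replicate 100000 A).flatten) (k + 1) =
        (k / A.length : Nat) * A.sum + psum A (k % A.length + 1) := by
      have hk1 : k + 1 = (k / A.length) * A.length + (k % A.length + 1) := by
        rw [Nat.mul_comm]; omega
      rw [hk1]
      exact psum_flatten_replicate A (k / A.length) 100000 (k % A.length + 1)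
        (by omega) (Or.inl hc') (le_of_lt hc')
    rw [hsum]
    rcases lt_trichotomy (k / A.length) cN with h | h | h
    · have h1 := hcmin (k / A.length) h
      have h2 := hmax (k % A.length) hj'
      intro hgt
      linarith
    · have hj'' : k % A.length < j0 := by
        have : A.length * (k / A.length) = A.length * cN := by rw [h]
        have hcm : cN * A.length = A.length * cN := Nat.mul_comm _ _
        omega
      have h3 := hj0min' (k % A.length) hj''
      rw [h]
      intro hgt
      linarith
    · exfalso
      have h1 : cN + 1 ≤ k / A.length := h
      have h2 := Nat.mul_le_mul_right A.length h1
      have h3 : (cN + 1) * A.length = cN * A.length + A.length := by ring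
      have h4 : (k / A.length) * A.length = A.length * (k / A.length) := Nat.mul_comm _ _
      omega
  simp only [solveAltFinish]
  rw [List.findIdx?_eq_some_iff_getElem.2
    ⟨by rw [hplen]; exact hj0len, by
        rw [hpget j0 hj0len]; simpa using hj0gt, by
        intro j hj
        have := hj0min' j hj
        rw [hpget j (by omega)]
        simpa using this⟩]
  dsimp only
  have hcast : (cN : Int) * (A.length : Int) + (j0 : Int) = ((cN * A.length + j0 : Nat) : Int) := by
    push_cast; ring
  by_cases hi : cN * A.length + j0 < 1000000
  · -- answer inside the 10^6 cap
    have hi2 : cN * A.length + j0 < 100000 * A.length := by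
      rcases hcap with h | h
      · have := Nat.mul_le_mul_right A.length h
        omega
      · omega
    have hcN5 : cN < 100000 := by
      by_contra hcc
      have := Nat.mul_le_mul_right A.length (by omega : 100000 ≤ cN)
      omega
    have hPi : (cN * A.length + j0) < min 1000000 (100000 * A.length) ∧
        psum ((List.replicate 100000 A).flatten) (cN * A.length + j0 + 1) > X := by
      refine ⟨by omega, ?_⟩
      have hk1 : cN * A.length + j0 + 1 = cN * A.length + (j0 + 1) := by omega
      rw [hk1, psum_flatten_replicate A cN 100000 (j0 + 1) (by omega) (Or.inl hcN5)
        (le_of_lt hcN5)]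
      linarith
    have hex : ∃ k, k < min 1000000 (100000 * A.length) ∧
        psum ((List.replicate 100000 A).flatten) (k + 1) > X := ⟨_, hPi⟩
    rw [dif_pos hex]
    have hfind : Nat.find hex = cN * A.length + j0 := by
      rw [Nat.find_eq_iff]
      refine ⟨hPi, ?_⟩
      rintro k hk ⟨hk1, hk2⟩
      exact hnot k hk (by omega) hk2
    rw [hfind, if_pos (by rw [hcast]; exact_mod_cast hi), hcast]
  · -- answer beyond the cap: both return 0
    have hno : ¬ ∃ k, k < min 1000000 (100000 * A.length) ∧
        psum ((List.replicate 100000 A).flatten) (k + 1) > X := by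
      rintro ⟨k, hk1, hk2⟩
      exact hnot k (by omega) (by omega) hk2
    rw [dif_neg hno, if_neg (by rw [hcast]; exact_mod_cast hi)]

lemma solve_eq_dite (N : Int) (A : List Int) (X : Int) :
    solve N A X =
      (if h : ∃ k, k < min 1000000 (100000 * A.length) ∧
          psum ((List.replicate 100000 A).flatten) (k + 1) > X
       then ((Nat.find h : Nat) : Int) + 1 else 0) := by
  have hA := solveLoop_eq X ((List.replicate 100000 A).flatten) 1000000 0 0
  rw [length_flatten_replicate] at hA
  rw [solve, hA]
  by_cases hex : ∃ k, k < min 1000000 (100000 * A.length) ∧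
      psum ((List.replicate 100000 A).flatten) (k + 1) > X
  · have hex0 : ∃ k, k < min 1000000 (100000 * A.length) ∧
        (0 : Int) + psum ((List.replicate 100000 A).flatten) (k + 1) > X := by
      obtain ⟨k, h1, h2⟩ := hex
      exact ⟨k, h1, by linarith⟩
    rw [dif_pos hex0, dif_pos hex]
    have hf : Nat.find hex0 = Nat.find hex := by
      apply Nat.find_congr'
      intro n
      constructor
      · rintro ⟨h1, h2⟩; exact ⟨h1, by linarith⟩
      · rintro ⟨h1, h2⟩; exact ⟨h1, by linarith⟩
    rw [hf]
    norm_num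
  · have hex0 : ¬ ∃ k, k < min 1000000 (100000 * A.length) ∧
        (0 : Int) + psum ((List.replicate 100000 A).flatten) (k + 1) > X := by
      rintro ⟨k, h1, h2⟩
      exact hex ⟨k, h1, by linarith⟩
    rw [dif_neg hex0, dif_neg hex]

-- ===== VERDICT (by name: the statement is the Claim_ definition above) =====
theorem solve_spec : Claim_equal_solve := by
  intro N A X _ hPre
  obtain ⟨hne, hPre2⟩ := hPre
  have hL : 0 < A.length := List.length_pos_of_ne_nil hne
  unfold Spec_solve
  have hplen : (prefList 0 A).length = A.length := prefList_length 0 A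
  rcases hmS : PySem.List.max? (prefList 0 A) (fun p => p) with _ | m
  · exfalso
    rw [PySem.List.max?_eq_none_iff] at hmS
    rw [hmS] at hplen
    simp at hplen
    omega
  have hmax' : ∀ j, j < A.length → psum A (j + 1) ≤ m := by
    intro j hj
    have hmem' : (prefList 0 A)[j]'(by rw [hplen]; exact hj) ∈ prefList 0 A :=
      List.getElem_mem _
    have := PySem.List.max?_isMax hmS _ hmem'
    rwa [prefList_getElem 0 A j hj, zero_add] at this
  have hmem : ∃ jm, jm < A.length ∧ psum A (jm + 1) = m := by
    have := PySem.List.max?_mem hmS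
    rw [List.mem_iff_getElem] at this
    obtain ⟨jm, hjm, hv⟩ := this
    rw [hplen] at hjm
    refine ⟨jm, hjm, ?_⟩
    rwa [prefList_getElem 0 A jm hjm, zero_add] at hv
  unfold solve_alt
  dsimp only
  rw [hmS]
  dsimp only
  by_cases hmX : m > X
  · rw [if_pos hmX, solve_eq_dite]
    have := finish_eq A X m 0 hL hmax' hmem (by simpa using hmX)
      (fun c' hc' => absurd hc' (Nat.not_lt_zero _)) (Or.inl (by norm_num))
    rw [Nat.cast_zero] at this
    exact this.symm
  · rw [if_neg hmX]
    have hmle : m ≤ X := not_lt.1 hmX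
    by_cases hS : A.sum ≤ 0
    · rw [if_pos hS, solve_eq_dite, dif_neg]
      rintro ⟨k, hk1, hk2⟩
      have hj' : k % A.length < A.length := Nat.mod_lt _ hL
      have hkeq : A.length * (k / A.length) + k % A.length = k := Nat.div_add_mod k A.length
      have hc' : k / A.length < 100000 := by
        rw [Nat.div_lt_iff_lt_mul hL]
        omega
      have hsum : psum ((List.replicate 100000 A).flatten) (k + 1) =
          (k / A.length : Nat) * A.sum + psum A (k % A.length + 1) := by
        have hk1' : k + 1 = (k / A.length) * A.length + (k % A.length + 1) := by
          rw [Nat.mul_comm]; omega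
        rw [hk1']
        exact psum_flatten_replicate A (k / A.length) 100000 (k % A.length + 1)
          (by omega) (Or.inl hc') (le_of_lt hc')
      rw [hsum] at hk2
      have hnn : (0 : Int) ≤ ((k / A.length : Nat) : Int) := Int.natCast_nonneg _
      have h1 : ((k / A.length : Nat) : Int) * A.sum ≤ 0 :=
        mul_nonpos_of_nonneg_of_nonpos hnn hS
      have h2 := hmax' (k % A.length) hj'
      linarith
    · rw [if_neg hS]
      push_neg at hS
      have hqb : PySem.Int.floordiv (X - m) A.sum * A.sum ≤ X - m ∧
          X - m < (PySem.Int.floordiv (X - m) A.sum + 1) * A.sum :=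
        (PySem.Int.floordiv_eq_iff_of_pos hS).1 rfl
      have hq0 : 0 ≤ PySem.Int.floordiv (X - m) A.sum := by
        by_contra hq0
        push_neg at hq0
        have h1 : PySem.Int.floordiv (X - m) A.sum + 1 ≤ 0 := by omega
        have h2 : (PySem.Int.floordiv (X - m) A.sum + 1) * A.sum ≤ 0 :=
          mul_nonpos_of_nonpos_of_nonneg h1 (le_of_lt hS)
        linarith [hqb.2]
      have hcNc : (((PySem.Int.floordiv (X - m) A.sum + 1).toNat : Nat) : Int) =
          PySem.Int.floordiv (X - m) A.sum + 1 := Int.toNat_of_nonneg (by omega)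
      rw [solve_eq_dite, show PySem.Int.floordiv (X - m) A.sum + 1 =
        (((PySem.Int.floordiv (X - m) A.sum + 1).toNat : Nat) : Int) from hcNc.symm]
      refine (finish_eq A X m _ hL hmax' hmem ?_ ?_ ?_).symm
      · rw [hcNc]
        linarith [hqb.2]
      · intro c' hc'
        have hlt : ((c' : Nat) : Int) < (((PySem.Int.floordiv (X - m) A.sum + 1).toNat : Nat) : Int) :=
          Int.ofNat_lt.2 hc'
        rw [hcNc] at hlt
        have hle : ((c' : Nat) : Int) ≤ PySem.Int.floordiv (X - m) A.sum := by omega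
        have := mul_le_mul_of_nonneg_right hle (le_of_lt hS)
        linarith [hqb.1]
      · rcases hPre2 with h10 | ⟨j, hjL, hjgt⟩
        · exact Or.inr h10
        · left
          rw [if_pos hS] at hjgt
          have hps : (A.take (j + 1)).sum = psum A (j + 1) := rfl
          rw [hps] at hjgt
          by_contra hbig
          push_neg at hbig
          have hcge : (100000 : Int) ≤ (((PySem.Int.floordiv (X - m) A.sum + 1).toNat : Nat) : Int) := by
            exact_mod_cast Nat.succ_le_of_lt hbig
          have h1 : (99999 : Int) ≤ PySem.Int.floordiv (X - m) A.sum := by omega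
          have h2 := mul_le_mul_of_nonneg_right h1 (le_of_lt hS)
          have h3 := hmax' j hjL
          linarith [hqb.1]
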